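-- pv_equiv track=rewrite | github.com/papibe/advent-of-code-2024 | python/day17/part2.py | dfs
-- ===== SOURCE A (Python) =====
-- from typing import List
--
-- def dfs(program: List[int], index: int, value: int) -> int:
--     """reverse enginieered from program.txt"""
--
--     if index < 0:
--         return value
--
--     a: int
--     b: int
--     c: int
--     output: int
--     for octal_digit in range(8):
--         a = (value << 3) + octal_digit
--         b = a % 8
--         b = b ^ 1
--         c = a >> b
--         b = b ^ 4
--         b = b ^ c
--         output = b % 8
--
--         if output == program[index]:
--             next_value = dfs(program, index - 1, a)
--             if next_value != -1:
--                 return next_value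
--
--     return -1
-- ===== SOURCE B (Python) =====
-- def _out(a):
--     b = a % 8 ^ 1
--     return (b ^ 4 ^ (a >> b)) % 8
--
--
-- def dfs(program, index, value):
--     candidates = [value]
--     for i in range(index, -1, -1):
--         target = program[i]
--         candidates = [a for v in candidates
--                       for a in range(v << 3, (v << 3) + 8)
--                       if _out(a) == target]
--     for c in candidates:
--         if c != -1:
--             return c
--     return -1
-- ===== Notes on version B (the rewrite author's own statement) =====
-- stated objective: alternative
-- what changed: Replaced the recursive depth-first search with early return by an iterative level-by-level frontier: the whole set of valid prefixes is extended one program position at a time, and the answer is read off the final frontier.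
import Mathlib
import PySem

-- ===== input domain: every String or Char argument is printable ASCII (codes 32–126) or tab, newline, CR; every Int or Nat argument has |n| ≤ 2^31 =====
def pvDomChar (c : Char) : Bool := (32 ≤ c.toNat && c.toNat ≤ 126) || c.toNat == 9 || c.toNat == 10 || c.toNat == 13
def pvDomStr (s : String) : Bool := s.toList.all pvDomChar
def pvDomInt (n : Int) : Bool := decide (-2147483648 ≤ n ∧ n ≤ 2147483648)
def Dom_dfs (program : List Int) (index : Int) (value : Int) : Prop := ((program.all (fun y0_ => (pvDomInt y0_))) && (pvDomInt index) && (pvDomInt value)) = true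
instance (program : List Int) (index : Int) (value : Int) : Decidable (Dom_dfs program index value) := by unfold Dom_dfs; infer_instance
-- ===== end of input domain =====

-- B replaces A's recursive DFS (early return on first success) by an iterative
-- level-by-level frontier of all valid prefixes; objective: alternative (same cost class).

-- ===== PORT A =====
-- A's digit loop with its early returns becomes a foldl over an Option accumulator.
def dfs (program : List Int) (index : Int) (value : Int) : Int :=
  if index < 0 then value
  else
    ((PySem.List.pyRange 0 8 1).foldl
      (fun acc octal_digit =>
        if acc.isSome then acc
        else
          let a := (value <<< (3 : Nat)) + octal_digit
          let b := PySem.Int.bxor (PySem.Int.mod a 8) 1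
          let c := a >>> b.toNat
          let b := PySem.Int.bxor b 4
          let b := PySem.Int.bxor b c
          let output := PySem.Int.mod b 8
          if output = (PySem.List.pyGet? program index).getD 0 then
            let next_value := dfs program (index - 1) a
            if next_value ≠ -1 then some next_value else none
          else none)
      none).getD (-1)
termination_by (index + 1).toNat
decreasing_by omega

-- ===== PORT B =====
-- helper _out of Source B
def outF (a : Int) : Int :=
  let b := PySem.Int.bxor (PySem.Int.mod a 8) 1
  PySem.Int.mod (PySem.Int.bxor (PySem.Int.bxor b 4) (a >>> b.toNat)) 8

-- Source B's final scan "for c in candidates: if c != -1: return c; return -1"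
def firstNot : List Int → Int
  | [] => -1
  | c :: cs => if c ≠ -1 then c else firstNot cs

-- Source B's "for i in range(index, -1, -1)" frontier loop
def altLoop (program : List Int) (i : Int) (cands : List Int) : List Int :=
  if i < 0 then cands
  else
    altLoop program (i - 1)
      (cands.flatMap (fun v : Int =>
        (PySem.List.pyRange (v <<< (3 : Nat)) ((v <<< (3 : Nat)) + 8) 1).filter
          (fun a => outF a = (PySem.List.pyGet? program i).getD 0)))
termination_by (i + 1).toNat
decreasing_by omega

def dfs_alt (program : List Int) (index : Int) (value : Int) : Int :=
  firstNot (altLoop program index [value])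

-- ===== PRECONDITION & SPEC =====
-- Pre_ excludes exactly the inputs where Python A raises IndexError (program[index]
-- with 0 ≤ index and index ≥ len(program)); B raises there too.
def Pre_dfs (program : List Int) (index : Int) (value : Int) : Prop :=
  index < (program.length : Int)
instance (program : List Int) (index : Int) (value : Int) : Decidable (Pre_dfs program index value) := by unfold Pre_dfs; infer_instance

def pvWitness_dfs : List Int × Int × Int := ([4], 0, 0)

def Spec_dfs (program : List Int) (index : Int) (value : Int) (out : Int) : Prop := out = dfs_alt program index value
instance (program : List Int) (index : Int) (value : Int) (out : Int) : Decidable (Spec_dfs program index value out) := by unfold Spec_dfs; infer_instance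

-- ===== CLAIM (what is proved, stated in full; the proofs are below) =====
def Claim_equal_dfs : Prop := ∀ (program : List Int) (index : Int) (value : Int), Dom_dfs program index value → Pre_dfs program index value → Spec_dfs program index value (dfs program index value)

-- ===== LEMMAS AND PROOFS =====

-- the tree of all valid full extensions of value, in A's DFS order
def exts (program : List Int) (i : Int) (v : Int) : List Int :=
  if i < 0 then [v]
  else
    ((PySem.List.pyRange (v <<< (3 : Nat)) ((v <<< (3 : Nat)) + 8) 1).filter
        (fun a => outF a = (PySem.List.pyGet? program i).getD 0)).flatMap
      (fun a => exts program (i - 1) a)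
termination_by (i + 1).toNat
decreasing_by omega

-- A's per-candidate attempt, as a function of a = (value << 3) + d
def tryA (program : List Int) (i : Int) (a : Int) : Option Int :=
  if outF a = (PySem.List.pyGet? program i).getD 0 then
    (if dfs program (i - 1) a ≠ -1 then some (dfs program (i - 1) a) else none)
  else none

theorem foldl_match_some {α β : Type} (g : β → Option α) (l : List β) (r : α) :
    l.foldl (fun acc x => if acc.isSome then acc else g x) (some r) = some r := by
  induction l with
  | nil => rfl
  | cons x xs ih => simpa using ih

theorem foldl_match_none {α β : Type} (g : β → Option α) (l : List β) :
    l.foldl (fun acc x => if acc.isSome then acc else g x) none = l.findSome? g := by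
  induction l with
  | nil => rfl
  | cons x xs ih =>
    simp only [List.foldl, List.findSome?]
    cases h : g x with
    | some r => simpa [h] using foldl_match_some g xs r
    | none => simpa [h] using ih

theorem firstNot_append (l1 l2 : List Int) :
    firstNot (l1 ++ l2) = if firstNot l1 = -1 then firstNot l2 else firstNot l1 := by
  induction l1 with
  | nil => simp [firstNot]
  | cons c cs ih =>
    by_cases hc : c = -1 <;> simp [firstNot, hc, ih]

theorem findSome?_firstNot (program : List Int) (i : Int)
    (hIH : ∀ a, dfs program (i - 1) a = firstNot (exts program (i - 1) a)) (as : List Int) :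
    (as.findSome? (tryA program i)).getD (-1)
      = firstNot ((as.filter (fun a => outF a = (PySem.List.pyGet? program i).getD 0)).flatMap
          (fun a => exts program (i - 1) a)) := by
  induction as with
  | nil => rfl
  | cons a rest ih =>
    by_cases h : outF a = (PySem.List.pyGet? program i).getD 0
    · simp only [List.findSome?, tryA, h, if_pos, List.filter_cons, decide_eq_true_eq,
        List.flatMap_cons]
      rw [firstNot_append, ← hIH a]
      by_cases hnv : dfs program (i - 1) a = -1
      · simp [hnv, ih]
      · simp [hnv]
    · simp only [List.findSome?, tryA, h, List.filter_cons, decide_eq_true_eq, if_false]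
      simpa [tryA, h] using ih

theorem range8_lit : PySem.List.pyRange 0 8 1 = [0, 1, 2, 3, 4, 5, 6, 7] := by decide

theorem range8_shift (w : Int) :
    PySem.List.pyRange w (w + 8) 1 = List.map (fun d => w + d) [0, 1, 2, 3, 4, 5, 6, 7] := by
  rw [PySem.List.pyRange_one, show w + 8 - w = (8 : Int) by ring,
    show ((8 : Int)).toNat = 8 from rfl]
  norm_num [List.range_succ]

theorem dfs_eq_aux (program : List Int) :
    ∀ (n : Nat) (i v : Int), (i + 1).toNat ≤ n → dfs program i v = firstNot (exts program i v) := by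
  intro n
  induction n with
  | zero =>
    intro i v h
    have hi : i < 0 := by omega
    rw [dfs, exts]
    by_cases hv : v = -1 <;> simp [hi, firstNot, hv]
  | succ n ih =>
    intro i v h
    by_cases hi : i < 0
    · rw [dfs, exts]
      by_cases hv : v = -1 <;> simp [hi, firstNot, hv]
    · have hIH : ∀ a, dfs program (i - 1) a = firstNot (exts program (i - 1) a) :=
        fun a => ih (i - 1) a (by omega)
      have main := findSome?_firstNot program i hIH
        (List.map (fun d => (v <<< (3 : Nat)) + d) [0, 1, 2, 3, 4, 5, 6, 7])
      rw [List.findSome?_map] at main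
      rw [dfs, exts]
      simp only [if_neg hi]
      rw [foldl_match_none, range8_lit, range8_shift]
      exact main

theorem dfs_eq (program : List Int) (i v : Int) :
    dfs program i v = firstNot (exts program i v) :=
  dfs_eq_aux program ((i + 1).toNat) i v le_rfl

theorem altLoop_eq_aux (program : List Int) :
    ∀ (n : Nat) (i : Int), (i + 1).toNat ≤ n →
      ∀ C : List Int, altLoop program i C = C.flatMap (exts program i) := by
  intro n
  induction n with
  | zero =>
    intro i h C
    have hi : i < 0 := by omega
    rw [altLoop]
    have hfun : exts program i = fun v : Int => [v] :=
      funext fun v => by rw [exts]; simp [hi]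
    simp only [if_pos hi, hfun, List.flatMap_singleton']
  | succ n ih =>
    intro i h C
    by_cases hi : i < 0
    · rw [altLoop]
      have hfun : exts program i = fun v : Int => [v] :=
        funext fun v => by rw [exts]; simp [hi]
      simp only [if_pos hi, hfun, List.flatMap_singleton']
    · rw [altLoop]
      simp only [if_neg hi]
      rw [ih (i - 1) (by omega), List.flatMap_assoc]
      have hfun : exts program i = fun v : Int =>
          ((PySem.List.pyRange (v <<< (3 : Nat)) ((v <<< (3 : Nat)) + 8) 1).filter
            (fun a => outF a = (PySem.List.pyGet? program i).getD 0)).flatMap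
          (fun a => exts program (i - 1) a) :=
        funext fun v => by rw [exts]; simp [hi]
      rw [hfun]

theorem dfs_spec' (program : List Int) (index value : Int) :
    dfs program index value = dfs_alt program index value := by
  rw [dfs_eq, dfs_alt, altLoop_eq_aux program ((index + 1).toNat) index le_rfl]
  simp

-- ===== VERDICT (by name: the statement is the Claim_ definition above) =====
theorem dfs_spec : Claim_equal_dfs := by
  intro program index value _ _
  exact dfs_spec' program index value
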